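-- pv_equiv track=rewrite | github.com/VelichkinPetr/Algorithms | DZ_1/mod_5_task_5.py | get_list_count_people_month
-- ===== SOURCE A (Python) =====
-- def get_list_count_people_month(matrix):
--     sum_month = 0
--     month = matrix[0][1]
--     year = matrix[0][0]
--     output = []
--     for elem in matrix:
--             if month == elem[1]:
--                 sum_month += int(elem[-1])
--             else:
--                 output.append([year+' '+month,sum_month])
--                 month = elem[1]
--                 sum_month = int(elem[-1])
--     output.append([year+' '+month,sum_month])
--     return output
-- ===== SOURCE B (Python) =====
-- def get_list_count_people_month(matrix):
--     year = matrix[0][0]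
--     output = []
--     i, n = 0, len(matrix)
--     while i < n:
--         key = matrix[i][1]
--         j = i + 1
--         while j < n and matrix[j][1] == key:
--             j += 1
--         output.append([year + ' ' + key, sum(int(e[-1]) for e in matrix[i:j])])
--         i = j
--     return output
-- ===== Notes on version B (the rewrite author's own statement) =====
-- stated objective: alternative
-- what changed: B replaces A's flush-on-key-change running accumulator with explicit run segmentation: an index scan finds each maximal run of equal months and sums it with a generator expression.
import Mathlib
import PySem

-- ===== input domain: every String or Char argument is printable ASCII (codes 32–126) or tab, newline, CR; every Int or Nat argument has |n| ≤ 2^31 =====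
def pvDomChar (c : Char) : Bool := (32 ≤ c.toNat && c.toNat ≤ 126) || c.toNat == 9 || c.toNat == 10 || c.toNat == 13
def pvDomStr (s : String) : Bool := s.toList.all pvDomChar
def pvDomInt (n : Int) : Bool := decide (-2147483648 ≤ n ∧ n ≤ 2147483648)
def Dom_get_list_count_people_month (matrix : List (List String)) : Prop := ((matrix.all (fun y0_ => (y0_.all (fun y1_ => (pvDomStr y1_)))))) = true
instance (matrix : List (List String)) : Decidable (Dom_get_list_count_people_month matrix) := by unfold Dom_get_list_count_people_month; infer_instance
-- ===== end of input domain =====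

-- B replaces A's flush-on-key-change accumulator with explicit run segmentation (same cost, alternative decomposition).


-- elem[1] (month key) and int(elem[-1]) (count), shared extraction helpers
def pvKey (e : List String) : String := (PySem.List.pyGet? e 1).getD ""
def pvVal (e : List String) : Int := (PySem.Int.ofStr? ((PySem.List.pyGet? e (-1)).getD "")).getD 0

-- ===== PORT A =====
def stepA (year : String) (st : Int × String × List (String × Int)) (elem : List String) :
    Int × String × List (String × Int) :=
  if st.2.1 == pvKey elem then
    (st.1 + pvVal elem, st.2.1, st.2.2)
  else
    (pvVal elem, pvKey elem, st.2.2 ++ [(year ++ " " ++ st.2.1, st.1)])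

def get_list_count_people_month (matrix : List (List String)) : List (String × Int) :=
  let month := pvKey ((PySem.List.pyGet? matrix 0).getD [])
  let year := (PySem.List.pyGet? ((PySem.List.pyGet? matrix 0).getD []) 0).getD ""
  let st := matrix.foldl (stepA year) (0, month, [])
  st.2.2 ++ [(year ++ " " ++ st.2.1, st.1)]

-- ===== PORT B =====
-- one maximal run of equal month per step: takeWhile/dropWhile is the inner scanning while-loop of Source B
def altRuns (year : String) : List (List String) → List (String × Int)
  | [] => []
  | e :: rest =>
    let key := pvKey e
    (year ++ " " ++ key, pvVal e + ((rest.takeWhile (fun r => pvKey r == key)).map pvVal).sum)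
      :: altRuns year (rest.dropWhile (fun r => pvKey r == key))
termination_by l => l.length
decreasing_by
  simp only [List.length_cons]
  exact Nat.lt_succ_of_le (List.length_dropWhile_le _ _)

def get_list_count_people_month_alt (matrix : List (List String)) : List (String × Int) :=
  let year := (PySem.List.pyGet? ((PySem.List.pyGet? matrix 0).getD []) 0).getD ""
  altRuns year matrix

-- ===== PRECONDITION & SPEC =====
-- Pre_ = exactly the inputs where the Python A returns: nonempty matrix, every row has an
-- index-1 month entry and an int-parsable last entry (A raises IndexError/ValueError otherwise).
def Pre_get_list_count_people_month (matrix : List (List String)) : Prop :=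
  matrix ≠ [] ∧ ∀ r ∈ matrix, (PySem.List.pyGet? r 1).isSome ∧
    (PySem.Int.ofStr? ((PySem.List.pyGet? r (-1)).getD "")).isSome
instance (matrix : List (List String)) : Decidable (Pre_get_list_count_people_month matrix) := by
  unfold Pre_get_list_count_people_month; infer_instance

def pvWitness_get_list_count_people_month : List (List String) :=
  [["2019", "jan", "3"], ["2019", "jan", "4"], ["2019", "feb", "1"]]

def Spec_get_list_count_people_month (matrix : List (List String)) (out : List (String × Int)) : Prop := out = get_list_count_people_month_alt matrix
instance (matrix : List (List String)) (out : List (String × Int)) : Decidable (Spec_get_list_count_people_month matrix out) := by unfold Spec_get_list_count_people_month; infer_instance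

-- ===== CLAIM (what is proved, stated in full; the proofs are below) =====
def Claim_equal_get_list_count_people_month : Prop := ∀ (matrix : List (List String)), Dom_get_list_count_people_month matrix → Pre_get_list_count_people_month matrix → Spec_get_list_count_people_month matrix (get_list_count_people_month matrix)

-- ===== LEMMAS AND PROOFS =====

-- A's loop as a recursion: pending group (m, s), flushed on key change, closed at the end
def loopA (year : String) : String → Int → List (List String) → List (String × Int)
  | m, s, [] => [(year ++ " " ++ m, s)]
  | m, s, e :: t =>
    if m == pvKey e then loopA year m (s + pvVal e) t
    else (year ++ " " ++ m, s) :: loopA year (pvKey e) (pvVal e) t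

theorem foldA_eq_loopA (year : String) (l : List (List String)) :
    ∀ (s : Int) (m : String) (out : List (String × Int)),
    (let st := l.foldl (stepA year) (s, m, out);
     st.2.2 ++ [(year ++ " " ++ st.2.1, st.1)]) = out ++ loopA year m s l := by
  induction l with
  | nil => intro s m out; simp [loopA]
  | cons e t ih =>
    intro s m out
    simp only [List.foldl_cons, stepA, loopA]
    by_cases h : m == pvKey e
    · simp [h, ih]
    · simp [h, ih, List.append_assoc]

theorem loopA_eq_altRuns (year : String) (l : List (List String)) :
    ∀ (m : String) (s : Int),
    loopA year m s l =
      (year ++ " " ++ m, s + ((l.takeWhile (fun r => pvKey r == m)).map pvVal).sum)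
        :: altRuns year (l.dropWhile (fun r => pvKey r == m)) := by
  induction l with
  | nil => intro m s; simp [loopA, altRuns]
  | cons e t ih =>
    intro m s
    by_cases h : pvKey e = m
    · simp only [loopA, if_true, List.takeWhile_cons, List.dropWhile_cons, h,
        beq_self_eq_true, ih, List.map_cons, List.sum_cons, add_assoc]
    · have hb : (m == pvKey e) = false := by simp [Ne.symm h]
      have hb' : (pvKey e == m) = false := by simp [h]
      simp only [loopA, hb, if_false, List.takeWhile_cons, List.dropWhile_cons, hb',
        Bool.false_eq_true, if_false, List.map_nil, List.sum_nil, add_zero]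
      rw [ih]
      conv_rhs => rw [altRuns]

-- ===== VERDICT (by name: the statement is the Claim_ definition above) =====
theorem get_list_count_people_month_spec : Claim_equal_get_list_count_people_month := by
  intro matrix _ hpre
  unfold Spec_get_list_count_people_month
  obtain ⟨hne, -⟩ := hpre
  obtain ⟨e, t, rfl⟩ := List.exists_cons_of_ne_nil hne
  unfold get_list_count_people_month get_list_count_people_month_alt
  simp only [PySem.List.pyGet?, foldA_eq_loopA, List.nil_append]
  rw [loopA_eq_altRuns]
  conv_rhs => rw [altRuns]
  simp [PySem.List.pyIdx?]
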